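-- pv_equiv track=rewrite | github.com/dalembertian/advent-of-code | 2025/03/solve.py | invalid_id_2
-- ===== SOURCE A (Python) =====
-- def invalid_id_2(id):
--     # Assuming input has ranges with max 10-digits-long numbers
--     s = str(id)
--     l = len(s)
--
--     # Test possible chunk sizes, from 1 to half the size of the string
--     for k in range(l // 2, 0, -1):
--         if l % k == 0:
--             if s == s[:k] * (len(s) // k):
--                 return True
--     return False
-- ===== SOURCE B (Python) =====
-- def invalid_id_2(id):
--     # Periodicity via the classic doubled-string trick: str(id) is a repetition
--     # of a shorter block iff it occurs in str(id)+str(id) at a position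
--     # strictly between 0 and its length.
--     s = str(id)
--     return (s + s).find(s, 1) < len(s)
-- ===== Notes on version B (the rewrite author's own statement) =====
-- stated objective: idiomatic
-- what changed: Replaces the loop over divisor block sizes that rebuilds s[:k]*(l//k) with a single substring search in the doubled string: s is periodic iff (s+s).find(s,1) < len(s).
import Mathlib
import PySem

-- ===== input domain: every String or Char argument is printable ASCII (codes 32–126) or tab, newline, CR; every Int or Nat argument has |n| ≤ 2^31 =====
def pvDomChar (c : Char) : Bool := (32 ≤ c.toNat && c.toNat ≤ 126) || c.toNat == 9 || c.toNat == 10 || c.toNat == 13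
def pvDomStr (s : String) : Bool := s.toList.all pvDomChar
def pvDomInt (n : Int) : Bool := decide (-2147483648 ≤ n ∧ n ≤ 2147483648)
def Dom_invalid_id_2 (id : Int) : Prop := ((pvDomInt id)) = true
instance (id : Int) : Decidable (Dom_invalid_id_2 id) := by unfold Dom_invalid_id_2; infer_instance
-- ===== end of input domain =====

-- B replaces A's loop over divisor block sizes (rebuilding s[:k]*(l//k) for each k)
-- by the doubled-string periodicity trick: one find over s+s (objective: idiomatic).

-- ===== PORT A =====
def invalid_id_2 (id : Int) : Bool :=
  let s := PySem.Int.toChars id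
  let l : Int := (s.length : Int)
  -- for k in range(l // 2, 0, -1): the loop body only returns True or continues, so it is List.any
  (PySem.List.pyRange (PySem.Int.floordiv l 2) 0 (-1)).any (fun k =>
    PySem.Int.mod l k == 0 &&
      -- s == s[:k] * (len(s) // k): string repetition ported as flatten of replicate
      (s == (List.replicate (PySem.Int.floordiv l k).toNat
              (PySem.List.slice s none (some k))).flatten))

-- ===== PORT B =====
def invalid_id_2_alt (id : Int) : Bool :=
  let s := PySem.Int.toChars id
  decide (PySem.Chars.findFrom (s ++ s) s 1 none < (s.length : Int))

-- ===== PRECONDITION & SPEC =====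
def Spec_invalid_id_2 (id : Int) (out : Bool) : Prop := out = invalid_id_2_alt id
instance (id : Int) (out : Bool) : Decidable (Spec_invalid_id_2 id out) := by unfold Spec_invalid_id_2; infer_instance

-- ===== CLAIM (what is proved, stated in full; the proofs are below) =====
def Claim_equal_invalid_id_2 : Prop := ∀ (id : Int), Dom_invalid_id_2 id → Spec_invalid_id_2 id (invalid_id_2 id)

-- ===== LEMMAS AND PROOFS =====

-- s has k as a (not necessarily minimal) period
def pvPeriod (s : List Char) (k : Nat) : Prop :=
  ∀ i : Nat, (h : i + k < s.length) → s[i]'(by omega) = s[i + k]'h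

-- s is fixed by the cyclic rotation by p
def pvRot (s : List Char) (p : Nat) : Prop :=
  ∀ i : Nat, (h : i < s.length) → s[i]'h = s[(i + p) % s.length]'(Nat.mod_lt _ (by omega))

theorem pv_getElem_flatten_replicate (b : List Char) (m i : Nat) (hb : 0 < b.length)
    (h : i < ((List.replicate m b).flatten).length) :
    ((List.replicate m b).flatten)[i] = b[i % b.length]'(Nat.mod_lt _ hb) := by
  induction m generalizing i with
  | zero => simp at h
  | succ m ih =>
    simp only [List.replicate_succ, List.flatten_cons] at h ⊢
    rw [List.getElem_append]
    split
    · exact getElem_congr rfl (Nat.mod_eq_of_lt (by omega)).symm (by omega)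
    · rw [ih (i - b.length) (by simp at h ⊢; omega)]
      exact getElem_congr rfl (Nat.mod_eq_sub_mod (show i ≥ b.length by omega)).symm _

theorem pv_period_mod (s : List Char) (k : Nat) (hk : 0 < k) (hper : pvPeriod s k) :
    ∀ i : Nat, (h : i < s.length) → s[i]'h = s[i % k]'(Nat.lt_of_le_of_lt (Nat.mod_le i k) h) := by
  intro i
  induction i using Nat.strong_induction_on with
  | _ i ih =>
    intro h
    by_cases hik : i < k
    · exact getElem_congr rfl (Nat.mod_eq_of_lt hik).symm _
    · have h1 : (i - k) + k = i := by omega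
      have h2 : s[i - k]'(by omega) = s[i]'h := by
        have := hper (i - k) (by omega)
        rw [this]; exact getElem_congr rfl h1 _
      rw [← h2, ih (i - k) (by omega) (by omega)]
      exact getElem_congr rfl (Nat.mod_eq_sub_mod (show i ≥ k by omega)).symm _

theorem pv_rep_iff (s : List Char) (k : Nat) (hk : 0 < k) (hkn : k ≤ s.length)
    (hdvd : k ∣ s.length) :
    s = (List.replicate (s.length / k) (s.take k)).flatten ↔ pvPeriod s k := by
  have hbl : (s.take k).length = k := by simp [Nat.min_eq_left hkn]
  have hfl : ((List.replicate (s.length / k) (s.take k)).flatten).length = s.length := by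
    simp [hbl, Nat.div_mul_cancel hdvd]
  constructor
  · intro hrep i h
    have hi : i < s.length := by omega
    rw [List.getElem_of_eq hrep hi, List.getElem_of_eq hrep h]
    rw [pv_getElem_flatten_replicate _ _ _ (by omega) (by omega),
        pv_getElem_flatten_replicate _ _ _ (by omega) (by omega)]
    exact getElem_congr rfl (by rw [hbl, Nat.add_mod_right]) _
  · intro hper
    apply List.ext_getElem (by omega)
    intro i h1 h2
    rw [pv_getElem_flatten_replicate _ _ _ (by omega) (by omega)]
    rw [pv_period_mod s k hk hper i h1]
    rw [List.getElem_take]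
    exact getElem_congr rfl (by rw [hbl]) _

theorem pv_prefix_iff_getElem (l₁ l₂ : List Char) (hl : l₁.length ≤ l₂.length) :
    l₁ <+: l₂ ↔ ∀ i : Nat, (hi : i < l₁.length) → l₁[i]'hi = l₂[i]'(lt_of_lt_of_le hi hl) := by
  rw [List.prefix_iff_eq_take]
  constructor
  · intro h i hi
    conv_lhs => rw [List.getElem_of_eq h hi]
    rw [List.getElem_take]
  · intro h
    apply List.ext_getElem (by simp [Nat.min_eq_left hl])
    intro i h1 h2
    rw [List.getElem_take]
    exact h i h1

theorem pv_prefix_iff (s : List Char) (p : Nat) (hp : p ≤ s.length) :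
    s <+: (s.drop p ++ s) ↔ (pvPeriod s p ∧ pvPeriod s (s.length - p)) := by
  have hd : (s.drop p).length = s.length - p := by simp
  rw [pv_prefix_iff_getElem _ _ (by simp)]
  constructor
  · intro h
    constructor
    · intro i hi
      have heq := h i (by omega)
      rw [List.getElem_append] at heq
      rw [heq]
      split
      · rw [List.getElem_drop]; exact getElem_congr rfl (by omega) _
      · rename_i hge; exfalso; rw [hd] at hge; omega
    · intro j hj
      have heq := h (j + (s.length - p)) (by omega)
      rw [List.getElem_append] at heq
      rw [heq]
      split
      · rename_i hlt; exfalso; rw [hd] at hlt; omega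
      · exact (getElem_congr rfl (by omega) _).symm
  · intro ⟨h1, h2⟩ i hi
    rw [List.getElem_append]
    split
    · rename_i hlt
      rw [List.getElem_drop]
      rw [hd] at hlt
      rw [h1 i (by omega)]
      exact getElem_congr rfl (by omega) _
    · rename_i hge
      rw [hd] at hge
      have heq := h2 (i - (s.length - p)) (by omega)
      calc s[i]'hi = s[i - (s.length - p) + (s.length - p)]'(by omega) :=
            getElem_congr rfl (by omega) _
        _ = s[i - (s.length - p)]'(by omega) := heq.symm
        _ = s[i - (List.drop p s).length]'(by omega) := getElem_congr rfl (by omega) _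

theorem pvRot_of_periods (s : List Char) (p : Nat) (hp : p ≤ s.length)
    (h1 : pvPeriod s p) (h2 : pvPeriod s (s.length - p)) : pvRot s p := by
  intro i h
  by_cases hc : i + p < s.length
  · rw [h1 i hc]; exact getElem_congr rfl (Nat.mod_eq_of_lt hc).symm _
  · have hm : (i + p) % s.length = i - (s.length - p) := by
      rw [Nat.mod_eq_sub_mod (by omega), Nat.mod_eq_of_lt (by omega)]; omega
    have := h2 (i - (s.length - p)) (by omega)
    rw [show s[i]'h = s[i - (s.length - p) + (s.length - p)]'(by omega) from
        getElem_congr rfl (by omega) _, ← this]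
    exact (getElem_congr rfl (by omega) _).symm

theorem pvRot_zero (s : List Char) : pvRot s 0 := by
  intro i h; exact getElem_congr rfl (by rw [Nat.add_zero, Nat.mod_eq_of_lt h]) _

theorem pvRot_add (s : List Char) (a b : Nat) (ha : pvRot s a) (hb : pvRot s b) :
    pvRot s (a + b) := by
  intro i h
  rw [ha i h, hb ((i + a) % s.length) (Nat.mod_lt _ (by omega))]
  exact getElem_congr rfl (by rw [Nat.mod_add_mod, Nat.add_assoc]) _

theorem pvRot_mul (s : List Char) (p t : Nat) (hp : pvRot s p) : pvRot s (t * p) := by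
  induction t with
  | zero => simpa using pvRot_zero s
  | succ t ih => have := pvRot_add s (t * p) p ih hp
                 rwa [show t * p + p = (t+1) * p by ring] at this

theorem pvRot_congr (s : List Char) (a b : Nat) (hab : a % s.length = b % s.length)
    (ha : pvRot s a) : pvRot s b := by
  intro i h
  rw [ha i h]
  exact getElem_congr rfl (by rw [Nat.add_mod i a, hab, ← Nat.add_mod]) _

theorem pv_bezout (p n : Nat) (hn : 0 < n) :
    ∃ t : Nat, (t * p) % n = (Nat.gcd p n) % n := by
  refine ⟨((Nat.gcdA p n) % (n : Int)).toNat, ?_⟩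
  have hnz : (n : Int) ≠ 0 := by exact_mod_cast hn.ne'
  have ht : (((Nat.gcdA p n) % (n : Int)).toNat : Int) = (Nat.gcdA p n) % (n : Int) :=
    Int.toNat_of_nonneg (Int.emod_nonneg _ hnz)
  have key : (((((Nat.gcdA p n) % (n : Int)).toNat * p : Nat) : Int)) % (n : Int)
      = ((Nat.gcd p n : Nat) : Int) % (n : Int) := by
    push_cast
    rw [ht, Nat.gcd_eq_gcd_ab p n]
    conv_lhs => rw [Int.mul_emod, Int.emod_emod_of_dvd _ dvd_rfl, ← Int.mul_emod]
    rw [Int.mul_comm (p : Int) (Nat.gcdA p n), Int.add_mul_emod_self_left]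
  exact_mod_cast key

theorem pv_main (s : List Char) (hn : 0 < s.length) :
    (∃ k : Nat, 0 < k ∧ k ≤ s.length / 2 ∧ k ∣ s.length ∧
        s = (List.replicate (s.length / k) (s.take k)).flatten)
    ↔ (∃ p : Nat, 0 < p ∧ p < s.length ∧ s <+: (s.drop p ++ s)) := by
  constructor
  · rintro ⟨k, hk, hk2, hdvd, hrep⟩
    have hkn : k < s.length := by omega
    have hper : pvPeriod s k := (pv_rep_iff s k hk (by omega) hdvd).mp hrep
    refine ⟨k, hk, hkn, (pv_prefix_iff s k (by omega)).mpr ⟨hper, ?_⟩⟩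
    intro j hj
    have hdvd2 : k ∣ (s.length - k) := Nat.dvd_sub hdvd dvd_rfl
    rw [pv_period_mod s k hk hper j (by omega),
        pv_period_mod s k hk hper (j + (s.length - k)) hj]
    refine getElem_congr rfl ?_ _
    obtain ⟨c, hc⟩ := hdvd2
    rw [hc, Nat.add_mul_mod_self_left]
  · rintro ⟨p, hp, hpn, hpre⟩
    have ⟨hper1, hper2⟩ := (pv_prefix_iff s p (by omega)).mp hpre
    have hrot : pvRot s p := pvRot_of_periods s p (by omega) hper1 hper2
    set d := Nat.gcd p s.length with hd
    have hdp : d ∣ p := Nat.gcd_dvd_left _ _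
    have hdn : d ∣ s.length := Nat.gcd_dvd_right _ _
    have hd0 : 0 < d := Nat.gcd_pos_of_pos_left _ hp
    have hdle : d ≤ p := Nat.le_of_dvd hp hdp
    have hdlt : d < s.length := by omega
    have hhalf : d ≤ s.length / 2 := by
      rw [Nat.le_div_iff_mul_le (by omega)]
      rcases hdn with ⟨c, hc⟩
      have : 2 ≤ c := by
        rcases Nat.lt_or_ge c 2 with h | h
        · interval_cases c <;> omega
        · exact h
      calc d * 2 ≤ d * c := Nat.mul_le_mul_left d this
        _ = s.length := hc.symm
    obtain ⟨t, ht⟩ := pv_bezout p s.length hn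
    have hrotd : pvRot s d := pvRot_congr s (t * p) d (by rw [ht]) (pvRot_mul s p t hrot)
    have hperd : pvPeriod s d := by
      intro i h
      rw [hrotd i (by omega)]
      exact getElem_congr rfl (Nat.mod_eq_of_lt h) _
    exact ⟨d, hd0, hhalf, hdn, (pv_rep_iff s d hd0 (by omega) hdn).mpr hperd⟩

theorem pv_toChars_ne_nil (id : Int) : PySem.Int.toChars id ≠ [] := by
  unfold PySem.Int.toChars
  split
  · simp
  · have := Nat.length_toDigits_pos (b := 10) (n := id.toNat)
    intro h; rw [h] at this; simp at this

-- A's loop, characterised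
theorem pvA_iff (id : Int) :
    invalid_id_2 id = true ↔ ∃ k : Nat, 0 < k ∧ k ≤ (PySem.Int.toChars id).length / 2 ∧
      k ∣ (PySem.Int.toChars id).length ∧
      PySem.Int.toChars id =
        (List.replicate ((PySem.Int.toChars id).length / k)
          ((PySem.Int.toChars id).take k)).flatten := by
  set s := PySem.Int.toChars id with hs
  set n := s.length with hn
  have h2 : PySem.Int.floordiv (n : Int) 2 = ((n / 2 : Nat) : Int) := by
    exact_mod_cast PySem.Int.floordiv_natCast n 2
  unfold invalid_id_2
  rw [List.any_eq_true]
  constructor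
  · rintro ⟨k, hmem, hcond⟩
    rw [PySem.List.mem_pyRange_neg_one] at hmem
    rw [← hs, ← hn] at hmem hcond
    rw [h2] at hmem
    obtain ⟨hk0, hk2⟩ := hmem
    lift k to ℕ using (by omega) with m
    rw [Bool.and_eq_true, beq_iff_eq, beq_iff_eq] at hcond
    obtain ⟨hmod, hrep⟩ := hcond
    refine ⟨m, by omega, by exact_mod_cast hk2, ?_, ?_⟩
    · have := (PySem.Int.mod_eq_zero_iff_dvd _ _).mp hmod
      exact_mod_cast this
    · rw [PySem.List.slice_to_natCast, PySem.Int.floordiv_natCast] at hrep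
      simpa using hrep
  · rintro ⟨m, hm0, hm2, hdvd, hrep⟩
    refine ⟨(m : Int), ?_, ?_⟩
    · rw [PySem.List.mem_pyRange_neg_one, ← hs, ← hn, h2]
      constructor <;> [exact_mod_cast hm0; exact_mod_cast hm2]
    · rw [← hs, ← hn, Bool.and_eq_true, beq_iff_eq, beq_iff_eq]
      refine ⟨(PySem.Int.mod_eq_zero_iff_dvd _ _).mpr (by exact_mod_cast hdvd), ?_⟩
      rw [PySem.List.slice_to_natCast, PySem.Int.floordiv_natCast]
      simpa using hrep

-- B's find, characterised
theorem pvB_iff (id : Int) (hn : 0 < (PySem.Int.toChars id).length) :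
    invalid_id_2_alt id = true ↔ ∃ p : Nat, 0 < p ∧ p < (PySem.Int.toChars id).length ∧
      PySem.Int.toChars id <+: ((PySem.Int.toChars id).drop p ++ PySem.Int.toChars id) := by
  set s := PySem.Int.toChars id with hs
  set n := s.length with hn'
  show decide (PySem.Chars.findFrom (s ++ s) s 1 none < (n : Int)) = true ↔ _
  rw [decide_eq_true_iff]
  have h1 : PySem.Chars.findFrom (s ++ s) s 1 none =
      if PySem.Chars.find ((s ++ s).drop 1) s = -1 then -1
      else 1 + PySem.Chars.find ((s ++ s).drop 1) s := by
    have := PySem.Chars.findFrom_natCast (s ++ s) s 1 (by simp; omega)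
    exact_mod_cast this
  -- s occurs in (s++s).drop 1 (at position n-1), so find ≠ -1
  have hocc : s <:+: (s ++ s).drop 1 := by
    rw [List.drop_append_of_le_length (by omega)]
    exact (List.suffix_append _ _).isInfix
  have hne : PySem.Chars.find ((s ++ s).drop 1) s ≠ -1 :=
    (PySem.Chars.find_ne_neg_one_iff _ _).mpr hocc
  have hge : 0 ≤ PySem.Chars.find ((s ++ s).drop 1) s :=
    (PySem.Chars.find_nonneg_iff _ _).mpr hocc
  rw [h1, if_neg hne]
  set f := PySem.Chars.find ((s ++ s).drop 1) s with hf
  obtain ⟨hpre, hmin⟩ := PySem.Chars.find_spec (s := (s ++ s).drop 1) (sub := s) hge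
  constructor
  · intro hlt
    refine ⟨1 + f.toNat, by omega, by omega, ?_⟩
    have : ((s ++ s).drop 1).drop f.toNat = (s ++ s).drop (1 + f.toNat) := by
      rw [List.drop_drop]
    rw [this] at hpre
    rw [show (s ++ s).drop (1 + f.toNat) = s.drop (1 + f.toNat) ++ s from
      List.drop_append_of_le_length (by omega)] at hpre
    exact hpre
  · rintro ⟨p, hp0, hpn, hp⟩
    have : s <+: ((s ++ s).drop 1).drop (p - 1) := by
      rw [List.drop_drop, show 1 + (p - 1) = p by omega,
        List.drop_append_of_le_length (by omega)]
      exact hp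
    have hle : f.toNat ≤ p - 1 := by
      by_contra hcon
      exact hmin (p - 1) (by omega) this
    omega

-- ===== VERDICT (by name: the statement is the Claim_ definition above) =====
theorem invalid_id_2_spec : Claim_equal_invalid_id_2 := by
  intro id _
  unfold Spec_invalid_id_2
  have hn : 0 < (PySem.Int.toChars id).length :=
    List.length_pos_of_ne_nil (pv_toChars_ne_nil id)
  have h := (pvA_iff id).trans ((pv_main _ hn).trans (pvB_iff id hn).symm)
  rcases Bool.eq_false_or_eq_true (invalid_id_2 id) with h1 | h1 <;>
  rcases Bool.eq_false_or_eq_true (invalid_id_2_alt id) with h2 | h2 <;>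
  simp_all
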